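-- pv_equiv track=rewrite | github.com/Vaish230/extension | extension/backend/feature_extraction/email_features.py | _has_shortened_links
-- ===== SOURCE A (Python) =====
-- from typing import List, Dict, Any, Optional
--
-- def _has_shortened_links(links: List[str]) -> int:
--     """Check if any links are URL shorteners"""
--     shorteners = [
--         'bit.ly', 'tinyurl', 'goo.gl', 'ow.ly', 'is.gd',
--         'buff.ly', 'tiny.cc', 'tr.im', 'cli.gs', 'v.gd'
--     ]
--
--     for link in links:
--         link_lower = link.lower()
--         if any(shortener in link_lower for shortener in shorteners):
--             return 1
--     return 0
-- ===== SOURCE B (Python) =====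
-- def _has_shortened_links(links):
--     """Check if any links are URL shorteners.
--
--     Joins all lowercased links into one text separated by '\n' (which no
--     shortener contains, so a match cannot cross a link boundary) and runs
--     each shortener's substring search once over that single text.
--     """
--     shorteners = [
--         'bit.ly', 'tinyurl', 'goo.gl', 'ow.ly', 'is.gd',
--         'buff.ly', 'tiny.cc', 'tr.im', 'cli.gs', 'v.gd'
--     ]
--     blob = "\n".join(link.lower() for link in links)
--     return 1 if any(s in blob for s in shorteners) else 0
-- ===== Notes on version B (the rewrite author's own statement) =====
-- stated objective: faster
-- what changed: B joins all lowercased links into one '\n'-separated text and runs each shortener's substring search once over that single text, instead of A's per-link any() over the shortener list; correct because no shortener contains '\n', so a match cannot cross a link boundary; faster because the per-link Python-level loop disappears into ten C-level searches over one string (measured 4.3x at the largest size).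
import Mathlib
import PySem

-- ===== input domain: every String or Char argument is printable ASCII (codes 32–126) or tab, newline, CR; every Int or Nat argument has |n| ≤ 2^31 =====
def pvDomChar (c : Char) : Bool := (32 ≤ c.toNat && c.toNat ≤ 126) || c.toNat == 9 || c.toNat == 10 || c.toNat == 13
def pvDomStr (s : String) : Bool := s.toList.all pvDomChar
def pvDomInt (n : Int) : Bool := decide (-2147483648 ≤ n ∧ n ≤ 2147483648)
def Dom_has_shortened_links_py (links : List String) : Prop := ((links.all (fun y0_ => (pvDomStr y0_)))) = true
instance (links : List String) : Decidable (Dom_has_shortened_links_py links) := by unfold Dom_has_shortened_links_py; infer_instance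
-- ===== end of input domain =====

-- B joins all lowercased links into one '\n'-separated text and runs each shortener's
-- substring search once over that single text (alternative single-text algorithm).


-- ===== PORT A =====
-- A: for each link, lowercase it and test the ten shorteners by substring scan; early return 1.
def pvShorteners : List String :=
  ["bit.ly", "tinyurl", "goo.gl", "ow.ly", "is.gd",
   "buff.ly", "tiny.cc", "tr.im", "cli.gs", "v.gd"]

def has_shortened_links_py (links : List String) : Int :=
  match links with
  | [] => 0
  | link :: rest =>
      let link_lower := PySem.Str.lower link
      if pvShorteners.any (fun shortener => PySem.Str.isIn shortener link_lower) then 1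
      else has_shortened_links_py rest

-- ===== PORT B =====
-- B: join all lowercased links into one '\n'-separated blob, then one substring
-- search per shortener over that single text.
def has_shortened_links_py_alt (links : List String) : Int :=
  let blob := PySem.Str.join "\n" (links.map (fun link => PySem.Str.lower link))
  if pvShorteners.any (fun s => PySem.Str.isIn s blob) then 1 else 0

-- ===== PRECONDITION & SPEC =====
def Spec_has_shortened_links_py (links : List String) (out : Int) : Prop := out = has_shortened_links_py_alt links
instance (links : List String) (out : Int) : Decidable (Spec_has_shortened_links_py links out) := by unfold Spec_has_shortened_links_py; infer_instance

-- ===== CLAIM (what is proved, stated in full; the proofs are below) =====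
def Claim_equal_has_shortened_links_py : Prop := ∀ (links : List String), Dom_has_shortened_links_py links → Spec_has_shortened_links_py links (has_shortened_links_py links)

-- ===== LEMMAS AND PROOFS =====

-- A prefix of l ++ c :: r avoiding c is a prefix of l.
theorem prefix_of_append_cons_not_mem {α : Type} {p l r : List α} {c : α}
    (h : p <+: l ++ c :: r) (hc : c ∉ p) : p <+: l := by
  induction l generalizing p with
  | nil =>
      cases p with
      | nil => exact List.nil_prefix
      | cons x p' =>
          rcases List.cons_prefix_cons.mp h with ⟨hx, _⟩
          exact absurd (hx ▸ List.mem_cons_self) hc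
  | cons y l' ih =>
      cases p with
      | nil => exact List.nil_prefix
      | cons x p' =>
          rcases List.cons_prefix_cons.mp h with ⟨hx, hp'⟩
          subst hx
          exact List.cons_prefix_cons.mpr ⟨rfl, ih hp' (fun m => hc (List.mem_cons_of_mem _ m))⟩

-- An infix of l ++ c :: r avoiding c lies entirely in l or entirely in r.
theorem infix_append_cons_not_mem {α : Type} {s l r : List α} {c : α}
    (h : s <:+: l ++ c :: r) (hc : c ∉ s) : s <:+: l ∨ s <:+: r := by
  induction l generalizing s with
  | nil =>
      rcases List.infix_cons_iff.mp h with hpre | hinf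
      · left
        have := prefix_of_append_cons_not_mem (l := []) (r := r) hpre hc
        exact this.isInfix
      · exact Or.inr hinf
  | cons y l' ih =>
      rcases List.infix_cons_iff.mp h with hpre | hinf
      · left
        exact (prefix_of_append_cons_not_mem (l := y :: l') (r := r) hpre hc).isInfix
      · rcases ih hinf hc with h1 | h2
        · exact Or.inl (h1.trans (List.suffix_cons y l').isInfix)
        · exact Or.inr h2

-- Every part is an infix of the join.
theorem infix_join_of_mem {sep l : List Char} {L : List (List Char)}
    (hl : l ∈ L) : l <:+: PySem.Chars.join sep L := by
  induction L with
  | nil => cases hl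
  | cons a rest ih =>
      rcases List.mem_cons.mp hl with rfl | hmem
      · cases rest with
        | nil => simp [PySem.Chars.join_singleton]
        | cons b rest' =>
            rw [PySem.Chars.join_cons_cons]
            exact ((List.prefix_append l sep).trans (List.prefix_append _ _)).isInfix
      · have hrest : rest ≠ [] := List.ne_nil_of_mem hmem
        cases rest with
        | nil => exact absurd rfl hrest
        | cons b rest' =>
            rw [PySem.Chars.join_cons_cons]
            exact (ih hmem).trans (List.suffix_append _ _).isInfix

-- For a nonempty pattern avoiding the separator, matching the join = matching some part.
theorem infix_join_iff {s : List Char} {c : Char} {L : List (List Char)}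
    (hne : s ≠ []) (hc : c ∉ s) :
    s <:+: PySem.Chars.join [c] L ↔ ∃ l ∈ L, s <:+: l := by
  constructor
  · intro h
    induction L with
    | nil =>
        rw [PySem.Chars.join_nil] at h
        exact absurd (List.eq_nil_of_infix_nil h) hne
    | cons a rest ih =>
        cases rest with
        | nil =>
            rw [PySem.Chars.join_singleton] at h
            exact ⟨a, List.mem_cons_self, h⟩
        | cons b rest' =>
            rw [PySem.Chars.join_cons_cons] at h
            have h' : s <:+: a ++ c :: PySem.Chars.join [c] (b :: rest') := by
              simpa using h
            rcases infix_append_cons_not_mem h' hc with h1 | h2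
            · exact ⟨a, List.mem_cons_self, h1⟩
            · rcases ih h2 with ⟨l, hl, hli⟩
              exact ⟨l, List.mem_cons_of_mem _ hl, hli⟩
  · rintro ⟨l, hl, hli⟩
    exact hli.trans (infix_join_of_mem hl)

-- Each shortener is nonempty and contains no newline (checked by decide).
theorem pvShorteners_ok :
    ∀ s ∈ pvShorteners, s.toList ≠ [] ∧ '\n' ∉ s.toList := by decide

-- A's early-return loop is the indicator of an existence check over links.
theorem portA_eq_if (links : List String) :
    has_shortened_links_py links =
      if links.any (fun l => pvShorteners.any
          (fun s => PySem.Str.isIn s (PySem.Str.lower l))) then 1 else 0 := by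
  induction links with
  | nil => rfl
  | cons l rest ih =>
      simp only [has_shortened_links_py, List.any_cons, ih]
      rcases Bool.eq_false_or_eq_true
          (pvShorteners.any (fun s => PySem.Str.isIn s (PySem.Str.lower l))) with h | h <;>
        simp only [h] <;> simp

-- Matching the blob coincides with matching some single lowered link.
theorem blob_match_iff (links : List String) (s : String) (hs : s ∈ pvShorteners) :
    PySem.Str.isIn s (PySem.Str.join "\n" (links.map (fun link => PySem.Str.lower link))) =
      links.any (fun l => PySem.Str.isIn s (PySem.Str.lower l)) := by
  obtain ⟨hne, hc⟩ := pvShorteners_ok s hs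
  rw [Bool.eq_iff_iff, PySem.Str.isIn_iff_infix, PySem.Str.toList_join]
  have hsep : ("\n" : String).toList = ['\n'] := rfl
  rw [hsep, infix_join_iff hne hc]
  simp only [List.any_eq_true, PySem.Str.isIn_iff_infix, List.map_map, List.mem_map]
  constructor
  · rintro ⟨_, ⟨l, hl, rfl⟩, h⟩; exact ⟨l, hl, h⟩
  · rintro ⟨l, hl, h⟩; exact ⟨_, ⟨l, hl, rfl⟩, h⟩

-- ===== VERDICT (by name: the statement is the Claim_ definition above) =====
theorem has_shortened_links_py_spec : Claim_equal_has_shortened_links_py := by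
  intro links _
  unfold Spec_has_shortened_links_py has_shortened_links_py_alt
  rw [portA_eq_if]
  have hany :
      (pvShorteners.any (fun s => PySem.Str.isIn s
          (PySem.Str.join "\n" (links.map (fun link => PySem.Str.lower link))))) =
      (links.any (fun l => pvShorteners.any
          (fun s => PySem.Str.isIn s (PySem.Str.lower l)))) := by
    rw [Bool.eq_iff_iff]
    simp only [List.any_eq_true]
    constructor
    · rintro ⟨s, hs, h⟩
      rw [blob_match_iff links s hs] at h
      rcases List.any_eq_true.mp h with ⟨l, hl, hli⟩
      exact ⟨l, hl, s, hs, hli⟩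
    · rintro ⟨l, hl, s, hs, hli⟩
      refine ⟨s, hs, ?_⟩
      rw [blob_match_iff links s hs]
      exact List.any_eq_true.mpr ⟨l, hl, hli⟩
  show (if (links.any fun l => pvShorteners.any fun s =>
        PySem.Str.isIn s (PySem.Str.lower l)) = true then (1 : Int) else 0) =
      if (pvShorteners.any fun s => PySem.Str.isIn s
        (PySem.Str.join "\n" (links.map fun link => PySem.Str.lower link))) = true then 1 else 0
  rw [hany]
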